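-- pv_equiv track=rewrite | github.com/michaelkpenta/AOC2023_day2 | main.py | get_impossible_games_list
-- ===== SOURCE A (Python) =====
-- def get_colors_in_round(round_string: str):
--     color_list = round_string.strip().split(",")
--     colors = {"red": 0, "green": 0, "blue": 0}
--     for col in color_list:
--         [count, color] = col.split()
--         colors[color] = int(count)
--     return colors
--
-- def get_impossible_games_list(games: list, max_red: int, max_green: int, max_blue: int):
--     games_list = []
--     for game in games:
--         game_is_ok = True
--         for game_round in game[1]:
--             round_colors = get_colors_in_round(game_round)
--             if round_colors["red"] > max_red:
--                 game_is_ok = False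
--             if round_colors["green"] > max_green:
--                 game_is_ok = False
--             if round_colors["blue"] > max_blue:
--                 game_is_ok = False
--         if game_is_ok:
--             games_list.append(game[0])
--     return games_list
-- ===== SOURCE B (Python) =====
-- def get_colors_in_round(round_string: str):
--     color_list = round_string.strip().split(",")
--     colors = {"red": 0, "green": 0, "blue": 0}
--     for col in color_list:
--         [count, color] = col.split()
--         colors[color] = int(count)
--     return colors
--
-- def _game_maxima(rounds):
--     """Per-game component-wise maxima of the parsed (red, green, blue) round
--     triples, or None for a game with no rounds."""
--     best = None
--     for r in rounds:
--         c = get_colors_in_round(r)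
--         t = (c["red"], c["green"], c["blue"])
--         best = t if best is None else (max(best[0], t[0]),
--                                        max(best[1], t[1]),
--                                        max(best[2], t[2]))
--     return best
--
-- def get_impossible_games_list(games: list, max_red: int, max_green: int, max_blue: int):
--     # stage 1: summarise each game into (id, per-colour maxima)
--     summaries = [(gid, _game_maxima(rounds)) for gid, rounds in games]
--     # stage 2: one three-way comparison per game (a round-less game always passes)
--     return [gid for gid, m in summaries
--             if m is None or (m[0] <= max_red and m[1] <= max_green and m[2] <= max_blue)]
-- ===== Notes on version B (the rewrite author's own statement) =====
-- stated objective: alternative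
-- what changed: Two staged passes: first each game is reduced to an optional triple of per-colour maxima over its rounds (a max-accumulator instead of A's boolean flag that is flipped per round per colour), then a single three-way comparison per game selects the ids; correct because a max over the rounds is within the limit iff every round is.
import Mathlib
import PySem

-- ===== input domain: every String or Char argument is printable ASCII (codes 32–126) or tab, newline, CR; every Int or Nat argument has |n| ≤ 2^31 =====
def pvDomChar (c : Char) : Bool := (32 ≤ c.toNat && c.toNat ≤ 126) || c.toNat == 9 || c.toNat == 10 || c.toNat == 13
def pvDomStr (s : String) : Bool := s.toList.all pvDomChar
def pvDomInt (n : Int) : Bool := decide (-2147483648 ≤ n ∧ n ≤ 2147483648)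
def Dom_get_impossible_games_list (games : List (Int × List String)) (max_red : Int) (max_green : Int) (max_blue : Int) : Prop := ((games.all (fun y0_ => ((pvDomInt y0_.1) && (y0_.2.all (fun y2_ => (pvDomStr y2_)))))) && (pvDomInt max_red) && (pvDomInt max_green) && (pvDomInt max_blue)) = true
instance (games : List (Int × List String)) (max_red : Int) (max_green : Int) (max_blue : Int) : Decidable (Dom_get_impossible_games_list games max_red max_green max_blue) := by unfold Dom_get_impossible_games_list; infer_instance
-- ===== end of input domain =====

-- B is a two-stage alternative: each game is first summarised into an optional triple of
-- per-colour maxima over its rounds, then one three-way comparison per game selects the ids;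
-- return values proved equal on Pre_.

-- ===== PORT A =====
-- shared helper: literal port of get_colors_in_round; where Python raises (a piece that does not
-- split into exactly two words, or a non-int count) the match/getD guards keep it total — those
-- inputs are excluded by Pre_ below.
def get_colors_in_round (round_string : String) : PySem.Dict String Int :=
  (((PySem.Str.split? (PySem.Str.strip round_string) ",").getD [])).foldl
    (fun colors col =>
      match PySem.Str.split₀ col with
      | [count, color] => colors.insert color ((PySem.Int.ofStr? count).getD 0)
      | _ => colors)
    (PySem.Dict.ofList [("red", 0), ("green", 0), ("blue", 0)])

def get_impossible_games_list (games : List (Int × List String)) (max_red : Int) (max_green : Int) (max_blue : Int) : List Int :=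
  games.foldl
    (fun games_list game =>
      let game_is_ok := game.2.foldl
        (fun game_is_ok game_round =>
          let round_colors := get_colors_in_round game_round
          let game_is_ok := if round_colors.getD "red" 0 > max_red then false else game_is_ok
          let game_is_ok := if round_colors.getD "green" 0 > max_green then false else game_is_ok
          if round_colors.getD "blue" 0 > max_blue then false else game_is_ok)
        true
      if game_is_ok then games_list ++ [game.1] else games_list)
    []

-- ===== PORT B =====
-- _game_maxima from Source B: optional component-wise maxima of the parsed round triples
def game_maxima (rounds : List String) : Option (Int × Int × Int) :=
  rounds.foldl
    (fun best r =>
      let c := get_colors_in_round r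
      let t : Int × Int × Int := (c.getD "red" 0, c.getD "green" 0, c.getD "blue" 0)
      some (match best with
            | none => t
            | some b => (max b.1 t.1, max b.2.1 t.2.1, max b.2.2 t.2.2)))
    none

def get_impossible_games_list_alt (games : List (Int × List String)) (max_red : Int) (max_green : Int) (max_blue : Int) : List Int :=
  ((games.map (fun g => (g.1, game_maxima g.2))).filter
    (fun gm => match gm.2 with
      | none => true
      | some m => decide (m.1 ≤ max_red) && decide (m.2.1 ≤ max_green) && decide (m.2.2 ≤ max_blue))).map (·.1)

-- ===== PRECONDITION & SPEC =====
-- Pre_ excludes exactly the inputs on which Python A raises: a comma-piece of some round that does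
-- not split into exactly two whitespace-separated words (ValueError on unpacking) or whose first
-- word is not a valid int literal (ValueError in int()).
def Pre_get_impossible_games_list (games : List (Int × List String)) (max_red : Int) (max_green : Int) (max_blue : Int) : Prop :=
  ∀ g ∈ games, ∀ r ∈ g.2, ∀ col ∈ ((PySem.Str.split? (PySem.Str.strip r) ",").getD []),
    (PySem.Str.split₀ col).length = 2 ∧
      (PySem.Int.ofStr? ((PySem.Str.split₀ col).headD "")).isSome = true
instance (games : List (Int × List String)) (max_red : Int) (max_green : Int) (max_blue : Int) : Decidable (Pre_get_impossible_games_list games max_red max_green max_blue) := by unfold Pre_get_impossible_games_list; infer_instance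

def pvWitness_get_impossible_games_list : (List (Int × List String)) × Int × Int × Int :=
  ([(1, ["3 red, 2 blue", "1 green"]), (2, ["10 green"]), (3, [])], 4, 4, 4)

def Spec_get_impossible_games_list (games : List (Int × List String)) (max_red : Int) (max_green : Int) (max_blue : Int) (out : List Int) : Prop := out = get_impossible_games_list_alt games max_red max_green max_blue
instance (games : List (Int × List String)) (max_red : Int) (max_green : Int) (max_blue : Int) (out : List Int) : Decidable (Spec_get_impossible_games_list games max_red max_green max_blue out) := by unfold Spec_get_impossible_games_list; infer_instance

-- ===== CLAIM (what is proved, stated in full; the proofs are below) =====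
def Claim_equal_get_impossible_games_list : Prop := ∀ (games : List (Int × List String)) (max_red : Int) (max_green : Int) (max_blue : Int), Dom_get_impossible_games_list games max_red max_green max_blue → Pre_get_impossible_games_list games max_red max_green max_blue → Spec_get_impossible_games_list games max_red max_green max_blue (get_impossible_games_list games max_red max_green max_blue)

-- ===== LEMMAS AND PROOFS =====

-- "this round's parsed triple is within the limits"
def roundOk (max_red max_green max_blue : Int) (r : String) : Bool :=
  let c := get_colors_in_round r
  decide (c.getD "red" 0 ≤ max_red) && decide (c.getD "green" 0 ≤ max_green)
    && decide (c.getD "blue" 0 ≤ max_blue)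

-- "this optional maxima triple is within the limits"
def maxOk (max_red max_green max_blue : Int) : Option (Int × Int × Int) → Bool
  | none => true
  | some m => decide (m.1 ≤ max_red) && decide (m.2.1 ≤ max_green) && decide (m.2.2 ≤ max_blue)

-- A's inner flag loop over the rounds of one game equals "b && every round is ok".
theorem flag_fold_eq (max_red max_green max_blue : Int) (rs : List String) (b : Bool) :
    rs.foldl
      (fun game_is_ok game_round =>
        let round_colors := get_colors_in_round game_round
        let game_is_ok := if round_colors.getD "red" 0 > max_red then false else game_is_ok
        let game_is_ok := if round_colors.getD "green" 0 > max_green then false else game_is_ok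
        if round_colors.getD "blue" 0 > max_blue then false else game_is_ok)
      b
    = (b && rs.all (fun r => roundOk max_red max_green max_blue r)) := by
  induction rs generalizing b with
  | nil => simp
  | cons r t ih =>
    simp only [List.foldl_cons, List.all_cons, ih, roundOk]
    split_ifs <;> simp_all

-- B's maxima fold, measured by maxOk, is the conjunction of the per-round checks.
theorem maxOk_fold_eq (max_red max_green max_blue : Int) (rs : List String)
    (best : Option (Int × Int × Int)) :
    maxOk max_red max_green max_blue
      (rs.foldl
        (fun best r =>
          let c := get_colors_in_round r
          let t : Int × Int × Int := (c.getD "red" 0, c.getD "green" 0, c.getD "blue" 0)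
          some (match best with
                | none => t
                | some b => (max b.1 t.1, max b.2.1 t.2.1, max b.2.2 t.2.2)))
        best)
    = (maxOk max_red max_green max_blue best && rs.all (fun r => roundOk max_red max_green max_blue r)) := by
  induction rs generalizing best with
  | nil => simp
  | cons r t ih =>
    simp only [List.foldl_cons, List.all_cons, ih]
    cases best with
    | none => simp [maxOk, roundOk]
    | some b =>
      apply Bool.eq_iff_iff.mpr
      simp only [maxOk, roundOk, Bool.and_eq_true, decide_eq_true_eq, max_le_iff]
      generalize (get_colors_in_round r).getD "red" 0 = x
      generalize (get_colors_in_round r).getD "green" 0 = y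
      generalize (get_colors_in_round r).getD "blue" 0 = z
      tauto

theorem maxOk_game_maxima (max_red max_green max_blue : Int) (rs : List String) :
    maxOk max_red max_green max_blue (game_maxima rs)
    = rs.all (fun r => roundOk max_red max_green max_blue r) := by
  rw [game_maxima, maxOk_fold_eq]; rfl

-- the whole of A's outer fold, related to B's map-filter-map pipeline, for any accumulator
theorem outer_fold_eq (max_red max_green max_blue : Int) (games : List (Int × List String))
    (acc : List Int) :
    games.foldl
      (fun games_list game =>
        let game_is_ok := game.2.foldl
          (fun game_is_ok game_round =>
            let round_colors := get_colors_in_round game_round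
            let game_is_ok := if round_colors.getD "red" 0 > max_red then false else game_is_ok
            let game_is_ok := if round_colors.getD "green" 0 > max_green then false else game_is_ok
            if round_colors.getD "blue" 0 > max_blue then false else game_is_ok)
          true
        if game_is_ok then games_list ++ [game.1] else games_list)
      acc
    = acc ++ ((games.map (fun g => (g.1, game_maxima g.2))).filter
        (fun gm => match gm.2 with
          | none => true
          | some m => decide (m.1 ≤ max_red) && decide (m.2.1 ≤ max_green) && decide (m.2.2 ≤ max_blue))).map (·.1) := by
  induction games generalizing acc with
  | nil => simp
  | cons g t ih =>
    have hmatch : (match game_maxima g.2 with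
        | none => true
        | some m => decide (m.1 ≤ max_red) && decide (m.2.1 ≤ max_green) && decide (m.2.2 ≤ max_blue))
        = maxOk max_red max_green max_blue (game_maxima g.2) := by
      cases game_maxima g.2 <;> rfl
    simp only [List.foldl_cons, List.map_cons, List.filter_cons]
    rw [flag_fold_eq, Bool.true_and, ih]
    simp only [hmatch, maxOk_game_maxima]
    cases h : g.2.all (fun r => roundOk max_red max_green max_blue r) <;> simp

-- ===== VERDICT (by name: the statement is the Claim_ definition above) =====
theorem get_impossible_games_list_spec : Claim_equal_get_impossible_games_list := by
  intro games max_red max_green max_blue _ _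
  unfold Spec_get_impossible_games_list get_impossible_games_list get_impossible_games_list_alt
  rw [outer_fold_eq]
  simp
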